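-- pv_equiv track=rewrite | github.com/YadaYuki/atcoder- | abc275/d.py | f
-- ===== SOURCE A (Python) =====
-- memo = {}
--
-- def f(k):
--     if k==0:
--         return 1
--     else:
--         if k in memo:
--             return memo[k]
--         memo[k] = f(k//2) + f(k//3)
--         return memo[k]
-- ===== SOURCE B (Python) =====
-- def f(k):
--     # bottom-up DP over the closed-form set of reachable states k // (2**i * 3**j)
--     states = sorted({k // (2 ** i * 3 ** j) for i in range(33) for j in range(22)})
--     memo = {}
--     for s in states:
--         memo[s] = 1 if s == 0 else memo[s // 2] + memo[s // 3]
--     return memo[k]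
-- ===== Notes on version B (the rewrite author's own statement) =====
-- stated objective: alternative
-- what changed: Replaces the top-down memoized recursion by a bottom-up DP: the reachable states are enumerated in closed form as k // (2**i * 3**j), sorted ascending, and filled in one pass (no recursion, no memo-hit branching).
import Mathlib
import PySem

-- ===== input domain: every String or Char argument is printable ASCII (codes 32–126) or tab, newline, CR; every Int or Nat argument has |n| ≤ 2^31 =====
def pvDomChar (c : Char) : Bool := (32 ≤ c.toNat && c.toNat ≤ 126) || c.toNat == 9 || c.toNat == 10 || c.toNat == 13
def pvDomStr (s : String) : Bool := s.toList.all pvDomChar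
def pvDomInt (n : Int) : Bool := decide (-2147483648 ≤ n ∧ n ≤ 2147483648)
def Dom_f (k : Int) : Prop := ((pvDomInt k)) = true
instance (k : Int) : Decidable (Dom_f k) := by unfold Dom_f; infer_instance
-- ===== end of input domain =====

-- B replaces the memoized recursion by a bottom-up DP over the closed-form state set
-- {k // (2^i * 3^j)}; equivalence is about the return value (A also mutates a global memo).

-- ===== PORT A =====
-- A's recursion with its memo dict, made total with fuel (fuel = k.toNat + 1 is proved
-- sufficient below for k ≥ 0; the fuel-out value 0 is reached only outside Pre_f).
def fAuxA : Nat → PySem.Dict Int Int → Int → Int × PySem.Dict Int Int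
  | 0, memo, _ => (0, memo)
  | fuel + 1, memo, k =>
    if k = 0 then (1, memo)
    else
      match memo.get? k with
      | some v => (v, memo)
      | none =>
        let r2 := fAuxA fuel memo (PySem.Int.floordiv k 2)
        let r3 := fAuxA fuel r2.2 (PySem.Int.floordiv k 3)
        (r2.1 + r3.1, r3.2.insert k (r2.1 + r3.1))

def f (k : Int) : Int := (fAuxA (k.toNat + 1) PySem.Dict.empty k).1

-- ===== PORT B =====
-- literal transliteration of Source B; memo[s//2] (Python KeyError on a miss) is getD _ 0,
-- and every lookup is proved to hit under Pre_f.
def f_alt (k : Int) : Int :=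
  let vals := (List.range 33).flatMap
    (fun i => (List.range 22).map (fun j => PySem.Int.floordiv k ((2 : Int) ^ i * (3 : Int) ^ j)))
  let states := PySem.List.sorted (PySem.Set.ofList vals) (fun x => x) false
  let memo := states.foldl
    (fun m s => m.insert s
      (if s = 0 then 1 else m.getD (PySem.Int.floordiv s 2) 0 + m.getD (PySem.Int.floordiv s 3) 0))
    PySem.Dict.empty
  memo.getD k 0

-- ===== PRECONDITION & SPEC =====
-- Pre_f excludes k < 0, where A recurses forever on k//2 = k and raises RecursionError.
def Pre_f (k : Int) : Prop := 0 ≤ k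
instance (k : Int) : Decidable (Pre_f k) := by unfold Pre_f; infer_instance
def pvWitness_f : Int := (12)
def Spec_f (k : Int) (out : Int) : Prop := out = f_alt k
instance (k : Int) (out : Int) : Decidable (Spec_f k out) := by unfold Spec_f; infer_instance

-- ===== CLAIM (what is proved, stated in full; the proofs are below) =====
def Claim_equal_f : Prop := ∀ (k : Int), Dom_f k → Pre_f k → Spec_f k (f k)

-- ===== LEMMAS AND PROOFS =====

-- the pure recurrence both ports compute
def g : Nat → Int
  | 0 => 1
  | n + 1 => g ((n + 1) / 2) + g ((n + 1) / 3)
decreasing_by all_goals omega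

theorem g_pos (n : Nat) (h : 0 < n) : g n = g (n / 2) + g (n / 3) := by
  obtain ⟨m, rfl⟩ := Nat.exists_eq_add_of_lt h
  simp [g]

theorem floordiv_toNat (k b : Int) (hk : 0 ≤ k) (hb : 0 < b) :
    PySem.Int.floordiv k b = ((k.toNat / b.toNat : Nat) : Int) := by
  rw [PySem.Int.floordiv_eq_ediv_of_pos hb, Int.natCast_ediv,
      Int.toNat_of_nonneg hk, Int.toNat_of_nonneg hb.le]

theorem floordiv_nonneg' (k b : Int) (hk : 0 ≤ k) (hb : 0 < b) :
    0 ≤ PySem.Int.floordiv k b := by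
  rw [floordiv_toNat k b hk hb]; positivity

theorem floordiv_comp (k a b : Int) (hk : 0 ≤ k) (ha : 0 < a) (hb : 0 < b) :
    PySem.Int.floordiv (PySem.Int.floordiv k a) b = PySem.Int.floordiv k (a * b) := by
  rw [floordiv_toNat k a hk ha, floordiv_toNat _ b (by positivity) hb,
      floordiv_toNat k (a * b) hk (by positivity), Int.toNat_natCast,
      Int.toNat_mul ha.le hb.le, Nat.div_div_eq_div_mul]

-- A-side: correctness of the fueled memoized recursion
def InvA (m : PySem.Dict Int Int) : Prop := ∀ p ∈ m.items, 0 ≤ p.1 ∧ p.2 = g p.1.toNat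

theorem fAuxA_correct (fuel : Nat) : ∀ (k : Int) (m : PySem.Dict Int Int),
    0 ≤ k → k.toNat < fuel → InvA m →
    (fAuxA fuel m k).1 = g k.toNat ∧ InvA (fAuxA fuel m k).2 := by
  induction fuel with
  | zero => intro k m _ h _; omega
  | succ fuel ih =>
    intro k m hk hfuel hm
    by_cases h0 : k = 0
    · subst h0; simp [fAuxA, g]; exact hm
    · have h2 : PySem.Int.floordiv k 2 = ((k.toNat / 2 : Nat) : Int) := by
        simpa using floordiv_toNat k 2 hk (by omega)
      have h3 : PySem.Int.floordiv k 3 = ((k.toNat / 3 : Nat) : Int) := by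
        simpa using floordiv_toNat k 3 hk (by omega)
      rcases hg : m.get? k with _ | v
      · have r2 := ih (PySem.Int.floordiv k 2) m
          (by rw [h2]; positivity) (by rw [h2]; simp; omega) hm
        have r3 := ih (PySem.Int.floordiv k 3) (fAuxA fuel m (PySem.Int.floordiv k 2)).2
          (by rw [h3]; positivity) (by rw [h3]; simp; omega) r2.2
        have hval : (fAuxA fuel m (PySem.Int.floordiv k 2)).1 +
            (fAuxA fuel (fAuxA fuel m (PySem.Int.floordiv k 2)).2 (PySem.Int.floordiv k 3)).1
            = g k.toNat := by
          rw [r2.1, r3.1, h2, h3, Int.toNat_natCast, Int.toNat_natCast,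
              g_pos k.toNat (by omega)]
        constructor
        · simp only [fAuxA, if_neg h0, hg]
          exact hval
        · simp only [fAuxA, if_neg h0, hg]
          intro p hp
          rcases (PySem.Dict.mem_items_insert _ _ _ p).1 hp with hpe | hpo
          · subst hpe; exact ⟨hk, hval⟩
          · exact r3.2 p hpo.1
      · have hmem := PySem.Dict.mem_items_of_get?_eq_some _ hg
        have := hm _ hmem
        constructor
        · simp only [fAuxA, if_neg h0, hg]
          exact this.2
        · simp only [fAuxA, if_neg h0, hg]
          exact hm

-- B-side helpers: the candidate value list and the sorted state list
def valsB (k : Int) : List Int := (List.range 33).flatMap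
  (fun i => (List.range 22).map (fun j => PySem.Int.floordiv k ((2 : Int) ^ i * (3 : Int) ^ j)))

def statesB (k : Int) : List Int :=
  PySem.List.sorted (PySem.Set.ofList (valsB k)) (fun x => x) false

theorem mem_valsB (k : Int) (i j : Nat) (hi : i < 33) (hj : j < 22) :
    PySem.Int.floordiv k ((2 : Int) ^ i * (3 : Int) ^ j) ∈ valsB k := by
  unfold valsB
  simp only [List.mem_flatMap, List.mem_map, List.mem_range]
  exact ⟨i, hi, j, hj, rfl⟩

theorem mem_statesB_iff (k : Int) (x : Int) : x ∈ statesB k ↔ x ∈ valsB k := by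
  unfold statesB
  rw [PySem.List.mem_sorted, PySem.Set.mem_ofList]

theorem self_mem_statesB (k : Int) (hk : 0 ≤ k) : k ∈ statesB k := by
  rw [mem_statesB_iff]
  have h := mem_valsB k 0 0 (by omega) (by omega)
  simpa [floordiv_toNat k 1 hk (by omega), Int.toNat_of_nonneg hk] using h

theorem statesB_nonneg (k : Int) (hk : 0 ≤ k) : ∀ x ∈ statesB k, 0 ≤ x := by
  intro x hx
  rw [mem_statesB_iff] at hx
  unfold valsB at hx
  simp only [List.mem_flatMap, List.mem_map, List.mem_range] at hx
  obtain ⟨i, _, j, _, rfl⟩ := hx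
  exact floordiv_nonneg' k _ hk (by positivity)

theorem statesB_closed (k : Int) (hk : k ≤ 2147483648) (hk0 : 0 ≤ k) :
    ∀ s ∈ statesB k, 0 < s →
      PySem.Int.floordiv s 2 ∈ statesB k ∧ PySem.Int.floordiv s 3 ∈ statesB k := by
  intro s hs hpos
  rw [mem_statesB_iff] at hs
  unfold valsB at hs
  simp only [List.mem_flatMap, List.mem_map, List.mem_range] at hs
  obtain ⟨i, hi, j, hj, rfl⟩ := hs
  have hdpos : (0 : Int) < (2 : Int) ^ i * (3 : Int) ^ j := by positivity
  have hle : (2 : Int) ^ i * (3 : Int) ^ j ≤ k := by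
    by_contra hgt
    rw [floordiv_toNat k _ hk0 hdpos] at hpos
    have h1 : k.toNat < ((2 : Int) ^ i * (3 : Int) ^ j).toNat := by omega
    have : k.toNat / ((2 : Int) ^ i * (3 : Int) ^ j).toNat = 0 := Nat.div_eq_of_lt h1
    omega
  have hi31 : i ≤ 31 := by
    by_contra h
    have h32 : (2 : Int) ^ 32 ≤ (2 : Int) ^ i := by
      exact pow_le_pow_right₀ (by omega) (by omega)
    have h3 : (1 : Int) ≤ (3 : Int) ^ j := one_le_pow₀ (by omega)
    nlinarith
  have hj20 : j ≤ 19 := by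
    by_contra h
    have h20 : (3 : Int) ^ 20 ≤ (3 : Int) ^ j := by
      exact pow_le_pow_right₀ (by omega) (by omega)
    have h2 : (1 : Int) ≤ (2 : Int) ^ i := one_le_pow₀ (by omega)
    nlinarith
  constructor
  · rw [floordiv_comp k _ 2 hk0 hdpos (by omega)]
    have he : (2 : Int) ^ i * (3 : Int) ^ j * 2 = (2 : Int) ^ (i + 1) * (3 : Int) ^ j := by ring
    rw [he, mem_statesB_iff]
    exact mem_valsB k (i + 1) j (by omega) (by omega)
  · rw [floordiv_comp k _ 3 hk0 hdpos (by omega)]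
    have he : (2 : Int) ^ i * (3 : Int) ^ j * 3 = (2 : Int) ^ i * (3 : Int) ^ (j + 1) := by ring
    rw [he, mem_statesB_iff]
    exact mem_valsB k i (j + 1) (by omega) (by omega)

def stepB (m : PySem.Dict Int Int) (s : Int) : PySem.Dict Int Int :=
  m.insert s
    (if s = 0 then 1 else m.getD (PySem.Int.floordiv s 2) 0 + m.getD (PySem.Int.floordiv s 3) 0)

theorem foldB_correct (k : Int) (hk0 : 0 ≤ k) (hk : k ≤ 2147483648) :
    ∀ (rest pre : List Int) (m : PySem.Dict Int Int),
      statesB k = pre ++ rest →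
      (∀ x ∈ pre, m.getD x 0 = g x.toNat) →
      ∀ x ∈ pre ++ rest, (rest.foldl stepB m).getD x 0 = g x.toNat := by
  intro rest
  induction rest with
  | nil => intro pre m _ hpre x hx; simp at hx; exact hpre x hx
  | cons s rest' ih =>
    intro pre m hsplit hpre
    have hpw : (statesB k).Pairwise (· < ·) := PySem.List.sorted_ofList_pairwise_lt _
    have hsmem : s ∈ statesB k := by rw [hsplit]; simp
    have hs0 : 0 ≤ s := statesB_nonneg k hk0 s hsmem
    have hval : (if s = 0 then (1 : Int)
        else m.getD (PySem.Int.floordiv s 2) 0 + m.getD (PySem.Int.floordiv s 3) 0)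
        = g s.toNat := by
      by_cases h0 : s = 0
      · subst h0; simp [g]
      · have hspos : 0 < s := by omega
        obtain ⟨h2, h3⟩ := statesB_closed k hk hk0 s hsmem hspos
        have h2e : PySem.Int.floordiv s 2 = ((s.toNat / 2 : Nat) : Int) := by
          simpa using floordiv_toNat s 2 hs0 (by omega)
        have h3e : PySem.Int.floordiv s 3 = ((s.toNat / 3 : Nat) : Int) := by
          simpa using floordiv_toNat s 3 hs0 (by omega)
        have hlt2 : PySem.Int.floordiv s 2 < s := by rw [h2e]; omega
        have hlt3 : PySem.Int.floordiv s 3 < s := by rw [h3e]; omega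
        have hin_pre : ∀ y, y ∈ statesB k → y < s → y ∈ pre := by
          intro y hy hys
          rw [hsplit] at hy
          rcases List.mem_append.1 hy with h | h
          · exact h
          · exfalso
            rw [hsplit] at hpw
            rcases List.mem_cons.1 h with rfl | h'
            · omega
            · have hpw2 := (List.pairwise_append.1 hpw).2.1
              have := (List.pairwise_cons.1 hpw2).1 y h'
              omega
        rw [if_neg h0, hpre _ (hin_pre _ h2 hlt2), hpre _ (hin_pre _ h3 hlt3),
            h2e, h3e, Int.toNat_natCast, Int.toNat_natCast, g_pos s.toNat (by omega)]
    have hpre' : ∀ x ∈ pre ++ [s], (stepB m s).getD x 0 = g x.toNat := by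
      intro x hx
      rcases List.mem_append.1 hx with h | h
      · have hxs : x ≠ s := by
          rw [hsplit] at hpw
          have := (List.pairwise_append.1 hpw).2.2 x h s (by simp)
          omega
        unfold stepB
        rw [PySem.Dict.getD_insert_of_ne _ _ _ hxs]
        exact hpre x h
      · simp at h; subst h
        unfold stepB
        rw [PySem.Dict.getD_insert_self]
        exact hval
    intro x hx
    exact ih (pre ++ [s]) (stepB m s) (by rw [hsplit]; simp) hpre' x
      (by rw [List.append_assoc]; exact hx)

theorem f_alt_eq_g (k : Int) (hk0 : 0 ≤ k) (hk : k ≤ 2147483648) : f_alt k = g k.toNat := by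
  have h := foldB_correct k hk0 hk (statesB k) [] PySem.Dict.empty (by simp)
    (by intro x hx; simp at hx) k (by simpa using self_mem_statesB k hk0)
  unfold f_alt
  exact h

theorem f_eq_g (k : Int) (hk0 : 0 ≤ k) : f k = g k.toNat := by
  have h := fAuxA_correct (k.toNat + 1) k PySem.Dict.empty hk0 (by omega)
    (by intro p hp; simp [PySem.Dict.empty] at hp)
  exact h.1

-- ===== VERDICT (by name: the statement is the Claim_ definition above) =====
theorem f_spec : Claim_equal_f := by
  intro k hdom hpre
  unfold Spec_f
  have hk0 : 0 ≤ k := hpre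
  have hk : k ≤ 2147483648 := by
    unfold Dom_f pvDomInt at hdom
    simp at hdom
    omega
  rw [f_eq_g k hk0, f_alt_eq_g k hk0 hk]
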